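-- pv_equiv track=rewrite | github.com/kylekap/WesternElectricSPC | Project/core.py | rule5
-- ===== SOURCE A (Python) =====
-- def rule5(data, qtypoints=6):
--     """
--
--     Args:
--         data (list): _description_
--         qtypoints (int, optional): quantity of points to check if increasing/decreasing. Defaults to 6.
--
--     Returns:
--         _type_: _description_
--     """
--     res = [False for x in range(len(data))]
--     for i in range(len(data) - (qtypoints - 1)):
--         li = data[i : i + (qtypoints)]
--         chk = all(i < j for i, j in zip(li, li[1:]))
--         if chk:
--             res[i + (qtypoints - 1)] = True
--     return res
-- ===== SOURCE B (Python) =====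
-- def rule5(data, qtypoints=6):
--     """Single pass: track the length of the strictly-increasing streak ending
--     at each point; a point is marked when its streak reaches qtypoints."""
--     res = []
--     streak = 0
--     prev = None
--     for x in data:
--         if prev is not None and prev < x:
--             streak += 1
--         else:
--             streak = 1
--         res.append(streak >= qtypoints)
--         prev = x
--     return res
-- ===== Notes on version B (the rewrite author's own statement) =====
-- stated objective: faster
-- what changed: B replaces A's per-index window slicing and pairwise check (a length-qtypoints slice and scan for every index) by a single pass that maintains the length of the strictly-increasing streak ending at the current point and marks points whose streak reaches qtypoints.
import Mathlib
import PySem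

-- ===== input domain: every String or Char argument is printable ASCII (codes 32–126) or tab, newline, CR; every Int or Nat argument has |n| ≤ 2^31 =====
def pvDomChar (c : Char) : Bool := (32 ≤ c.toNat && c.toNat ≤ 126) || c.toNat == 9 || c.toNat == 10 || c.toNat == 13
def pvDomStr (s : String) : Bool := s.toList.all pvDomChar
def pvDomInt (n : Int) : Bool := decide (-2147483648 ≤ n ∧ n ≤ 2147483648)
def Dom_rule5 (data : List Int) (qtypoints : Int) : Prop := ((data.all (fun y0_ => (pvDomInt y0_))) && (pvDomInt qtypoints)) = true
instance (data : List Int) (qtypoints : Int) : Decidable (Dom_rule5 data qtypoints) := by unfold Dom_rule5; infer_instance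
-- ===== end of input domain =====

-- B replaces A's per-index window slice-and-scan by a single pass tracking the
-- current strictly-increasing streak length (O(n·k) → O(n)).


-- ===== PORT A =====
def rule5 (data : List Int) (qtypoints : Int) : List Bool :=
  let res : List Bool := (PySem.List.pyRange 0 (data.length : Int)).map (fun _ => false)
  (PySem.List.pyRange 0 ((data.length : Int) - (qtypoints - 1))).foldl
    (fun res i =>
      let li := PySem.List.slice data (some i) (some (i + qtypoints))
      let chk := (li.zip (PySem.List.slice li (some 1) none)).all (fun p => decide (p.1 < p.2))
      -- res[i + (qtypoints - 1)] = True : Python list assignment (negative index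
      -- wraps); the out-of-range case (IndexError) is excluded by Pre_rule5.
      if chk then PySem.List.pySetD res (i + (qtypoints - 1)) true else res)
    res

-- ===== PORT B =====
def rule5_alt (data : List Int) (qtypoints : Int) : List Bool :=
  (data.foldl
    (fun (st : List Bool × Int × Option Int) x =>
      let streak : Int :=
        match st.2.2 with
        | some p => if p < x then st.2.1 + 1 else 1
        | none => 1
      (st.1 ++ [decide (qtypoints ≤ streak)], streak, some x))
    ([], 0, none)).1

-- ===== PRECONDITION & SPEC =====
-- Pre_ excludes exactly the inputs on which A raises IndexError: qtypoints ≤ 0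
-- with len(data) ≤ -qtypoints, where the wrapped write index falls before the list.
def Pre_rule5 (data : List Int) (qtypoints : Int) : Prop :=
  1 ≤ qtypoints ∨ 1 ≤ (data.length : Int) + qtypoints
instance (data : List Int) (qtypoints : Int) : Decidable (Pre_rule5 data qtypoints) := by unfold Pre_rule5; infer_instance
def pvWitness_rule5 : List Int × Int := ([1, 2, 3], 6)

def Spec_rule5 (data : List Int) (qtypoints : Int) (out : List Bool) : Prop := out = rule5_alt data qtypoints
instance (data : List Int) (qtypoints : Int) (out : List Bool) : Decidable (Spec_rule5 data qtypoints out) := by unfold Spec_rule5; infer_instance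

-- ===== CLAIM (what is proved, stated in full; the proofs are below) =====
def Claim_equal_rule5 : Prop := ∀ (data : List Int) (qtypoints : Int), Dom_rule5 data qtypoints → Pre_rule5 data qtypoints → Spec_rule5 data qtypoints (rule5 data qtypoints)

-- ===== LEMMAS AND PROOFS =====

def chkF : List Int → Bool
  | [] => true
  | [_] => true
  | a :: b :: t => decide (a < b) && chkF (b :: t)

lemma chkF_eq (li : List Int) :
    (li.zip (PySem.List.slice li (some 1) none)).all (fun p => decide (p.1 < p.2)) = chkF li := by
  rw [PySem.List.slice_from_one]
  induction li with
  | nil => rfl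
  | cons a t ih =>
    cases t with
    | nil => rfl
    | cons b t' =>
      simp only [List.tail_cons, List.zip_cons_cons, List.all_cons, chkF]
      rw [← ih]
      simp [List.tail_cons]

lemma chkF_concat (zs : List Int) (x : Int) :
    chkF (zs ++ [x]) =
      (chkF zs && (match zs.getLast? with | none => true | some p => decide (p < x))) := by
  induction zs with
  | nil => rfl
  | cons a t ih =>
    cases t with
    | nil => simp [chkF]
    | cons b t' =>
      simp only [List.cons_append, chkF]
      rw [show b :: (t' ++ [x]) = (b :: t') ++ [x] by rfl, ih]
      simp [List.getLast?_cons_cons, Bool.and_assoc]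

def rl : List Int → Int
  | [] => 0
  | [_] => 1
  | a :: b :: t => if b < a then rl (b :: t) + 1 else 1

def streakOf (ys : List Int) : Int := rl ys.reverse

lemma rl_nonneg (l : List Int) : 0 ≤ rl l := by
  induction l with
  | nil => simp [rl]
  | cons a t ih =>
    cases t with
    | nil => simp [rl]
    | cons b t' =>
      simp only [rl]
      split <;> omega

lemma one_le_streakOf (ys : List Int) (h : ys ≠ []) : 1 ≤ streakOf ys := by
  unfold streakOf
  have : ys.reverse ≠ [] := by simpa using h
  cases hr : ys.reverse with
  | nil => exact absurd hr this
  | cons a t =>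
    cases t with
    | nil => simp [rl]
    | cons b t' =>
      simp only [rl]
      have := rl_nonneg (b :: t')
      split <;> omega

lemma streakOf_concat (ys : List Int) (x : Int) :
    streakOf (ys ++ [x]) =
      (match ys.getLast? with | none => 1 | some p => if p < x then streakOf ys + 1 else 1) := by
  unfold streakOf
  rw [List.reverse_append]
  simp only [List.reverse_singleton, List.singleton_append]
  cases hr : ys.reverse with
  | nil =>
    have : ys = [] := by simpa using congrArg List.reverse hr
    subst this; rfl
  | cons b t =>
    have hlast : ys.getLast? = some b := by
      rw [← List.head?_reverse, hr]; rfl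
    rw [hlast]
    simp [rl]

def resOf (qty : Int) (ys : List Int) : List Bool :=
  (List.range ys.length).map (fun j => decide (qty ≤ streakOf (ys.take (j + 1))))

lemma resOf_concat (qty : Int) (ys : List Int) (x : Int) :
    resOf qty (ys ++ [x]) = resOf qty ys ++ [decide (qty ≤ streakOf (ys ++ [x]))] := by
  unfold resOf
  rw [List.length_append, List.length_singleton, List.range_succ, List.map_append]
  congr 1
  · apply List.map_congr_left
    intro j hj
    rw [List.mem_range] at hj
    rw [List.take_append_of_le_length (by omega)]
  · simp only [List.map_singleton, List.cons.injEq, and_true]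
    congr 1
    rw [show ys.length + 1 = (ys ++ [x]).length by simp, List.take_length]

lemma foldlB (qty : Int) (rest pref : List Int) :
    rest.foldl
      (fun (st : List Bool × Int × Option Int) x =>
        let streak : Int :=
          match st.2.2 with
          | some p => if p < x then st.2.1 + 1 else 1
          | none => 1
        (st.1 ++ [decide (qty ≤ streak)], streak, some x))
      (resOf qty pref, streakOf pref, pref.getLast?)
    = (resOf qty (pref ++ rest), streakOf (pref ++ rest), (pref ++ rest).getLast?) := by
  induction rest generalizing pref with
  | nil => simp
  | cons x rest ih =>
    rw [List.foldl_cons]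
    have hstreak :
        (match pref.getLast? with
          | some p => if p < x then streakOf pref + 1 else 1
          | none => (1 : Int)) = streakOf (pref ++ [x]) := by
      rw [streakOf_concat]
      cases pref.getLast? <;> rfl
    have hres : resOf qty pref ++ [decide (qty ≤ streakOf (pref ++ [x]))]
        = resOf qty (pref ++ [x]) := (resOf_concat qty pref x).symm
    simp only []
    rw [hstreak, hres]
    have hlast : some x = (pref ++ [x]).getLast? := by simp
    rw [hlast, ih (pref ++ [x])]
    simp

lemma ruleB_eq (data : List Int) (qty : Int) : rule5_alt data qty = resOf qty data := by
  unfold rule5_alt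
  have h0 : (([] : List Bool), (0 : Int), (none : Option Int))
      = (resOf qty [], streakOf [], ([] : List Int).getLast?) := by rfl
  rw [h0, foldlB qty data []]
  simp

lemma getD_pySetD (res : List Bool) (k : Int) (j : Nat) :
    (PySem.List.pySetD res k true).getD j false =
      (if PySem.List.pyIdx? res.length k = some j then true else res.getD j false) := by
  unfold PySem.List.pySetD PySem.List.pySet?
  cases h : PySem.List.pyIdx? res.length k with
  | none => simp [h]
  | some m =>
    simp only [h, Option.map_some, Option.getD_some]
    have hm : m < res.length := by
      unfold PySem.List.pyIdx? at h
      split_ifs at h <;> simp_all <;> omega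
    by_cases hj : m = j
    · subst hj
      simp [List.getD_eq_getElem?_getD, List.getElem?_set_self, hm]
    · have : (some m = some j) = False := by simp [hj]
      simp [List.getD_eq_getElem?_getD, List.getElem?_set_ne hj, hj]

lemma foldlA_len (f : Int → Bool) (g : Int → Int) (l : List Int) (res : List Bool) :
    (l.foldl (fun r i => if f i then PySem.List.pySetD r (g i) true else r) res).length
      = res.length := by
  induction l generalizing res with
  | nil => rfl
  | cons x l ih =>
    rw [List.foldl_cons, ih]
    by_cases h : f x <;> simp [h, PySem.List.length_pySetD]

lemma foldlA (f : Int → Bool) (g : Int → Int) (l : List Int) (res : List Bool) (j : Nat) :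
    (l.foldl (fun r i => if f i then PySem.List.pySetD r (g i) true else r) res).getD j false
      = (res.getD j false ||
         l.any (fun i => f i && (PySem.List.pyIdx? res.length (g i) == some j))) := by
  induction l generalizing res with
  | nil => simp
  | cons x l ih =>
    rw [List.foldl_cons, ih]
    have hlen : (if f x then PySem.List.pySetD res (g x) true else res).length = res.length := by
      by_cases h : f x <;> simp [h, PySem.List.length_pySetD]
    rw [hlen]
    by_cases h : f x
    · simp only [h, if_true, List.any_cons, getD_pySetD]
      by_cases hk : PySem.List.pyIdx? res.length (g x) = some j
      · simp [hk]
      · have hb : (PySem.List.pyIdx? res.length (g x) == some j) = false := by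
          simpa using hk
        simp [hk, hb]
    · simp [h]

lemma init_getD_false (l : List Int) (j : Nat) :
    ((l.map (fun _ => false)).getD j false) = false := by
  rw [List.getD_eq_getElem?_getD, List.getElem?_map]
  cases l[j]? <;> rfl

lemma rl_le_length (l : List Int) : rl l ≤ (l.length : Int) := by
  induction l with
  | nil => simp [rl]
  | cons a t ih =>
    cases t with
    | nil => simp [rl]
    | cons b t' =>
      simp only [rl, List.length_cons] at *
      split <;> push_cast <;> omega

lemma streakOf_le_length (ys : List Int) : streakOf ys ≤ (ys.length : Int) := by
  have := rl_le_length ys.reverse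
  simpa [streakOf] using this

lemma main_iff (ys : List Int) (k : Nat) (hk : 1 ≤ k) :
    ((k : Int) ≤ streakOf ys ↔ k ≤ ys.length ∧ chkF (ys.drop (ys.length - k)) = true) := by
  induction ys using List.reverseRecOn generalizing k with
  | nil =>
    simp only [streakOf, List.reverse_nil, rl, List.length_nil]
    constructor
    · intro h; omega
    · intro ⟨h, _⟩; omega
  | append_singleton ys x ih =>
    rw [streakOf_concat]
    cases hl : ys.getLast? with
    | none =>
      have hnil : ys = [] := List.getLast?_eq_none_iff.mp hl
      subst hnil
      simp only [List.nil_append, List.length_singleton]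
      by_cases hk1 : k = 1
      · subst hk1; simp [chkF]
      · have h2 : 2 ≤ k := by omega
        constructor
        · intro h; exfalso; omega
        · intro ⟨h, _⟩; exfalso; omega
    | some p =>
      have hys : ys ≠ [] := by
        intro h; subst h; simp at hl
      have hn1 : 1 ≤ ys.length := List.length_pos_of_ne_nil hys
      simp only [List.length_append, List.length_singleton]
      by_cases hk1 : k = 1
      · subst hk1
        have hdrop : (ys ++ [x]).drop (ys.length + 1 - 1) = [x] := by
          simpa using List.drop_left (l₁ := ys) (l₂ := [x])
        rw [hdrop]
        simp only [chkF]
        have hge := one_le_streakOf ys hys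
        constructor
        · intro _; exact ⟨by omega, trivial⟩
        · intro _; split <;> omega
      · have h2 : 2 ≤ k := by omega
        by_cases hkn : k ≤ ys.length + 1
        · have hdropeq : (ys ++ [x]).drop (ys.length + 1 - k)
              = ys.drop (ys.length + 1 - k) ++ [x] :=
            List.drop_append_of_le_length (by omega)
          have hzs_ne : ys.drop (ys.length + 1 - k) ≠ [] := by
            intro h
            have := congrArg List.length h
            simp only [List.length_drop, List.length_nil] at this
            omega
          have hzs_last : (ys.drop (ys.length + 1 - k)).getLast? = some p := by
            rw [List.getLast?_drop, if_neg (by omega), hl]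
          rw [hdropeq, chkF_concat, hzs_last]
          by_cases hpx : p < x
          · rw [if_pos hpx]
            have hIH := ih (k - 1) (by omega)
            have harith : ys.length - (k - 1) = ys.length + 1 - k := by omega
            rw [harith] at hIH
            constructor
            · intro h
              have : ((k - 1 : Nat) : Int) ≤ streakOf ys := by push_cast; omega
              obtain ⟨h1, h2'⟩ := hIH.mp this
              exact ⟨by omega, by simp [h2', hpx]⟩
            · intro ⟨h1, h2'⟩
              simp only [Bool.and_eq_true, decide_eq_true_eq] at h2'
              have : ((k - 1 : Nat) : Int) ≤ streakOf ys := hIH.mpr ⟨by omega, h2'.1⟩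
              push_cast at this; omega
          · rw [if_neg hpx]
            constructor
            · intro h; exfalso; omega
            · intro ⟨h1, h2'⟩
              simp [hpx] at h2'
        · constructor
          · intro h
            exfalso
            have hle := streakOf_le_length ys
            split at h <;> omega
          · intro ⟨h1, _⟩; exfalso; omega

def fA (data : List Int) (qty : Int) (i : Int) : Bool :=
  ((PySem.List.slice data (some i) (some (i + qty))).zip
      (PySem.List.slice (PySem.List.slice data (some i) (some (i + qty))) (some 1) none)).all
    (fun p => decide (p.1 < p.2))

lemma ruleA_foldl (data : List Int) (qty : Int) :
    rule5 data qty =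
      (PySem.List.pyRange 0 ((data.length : Int) - (qty - 1))).foldl
        (fun r i => if fA data qty i then PySem.List.pySetD r (i + (qty - 1)) true else r)
        ((PySem.List.pyRange 0 (data.length : Int)).map (fun _ => false)) := rfl

lemma init_len (n : Nat) :
    ((PySem.List.pyRange 0 (n : Int)).map (fun (_ : Int) => false)).length = n := by
  simp [PySem.List.pyRange_one]

lemma ruleA_eq_resOf (data : List Int) (qty : Int) (hpre : 1 ≤ qty ∨ 1 ≤ (data.length : Int) + qty) :
    rule5 data qty = resOf qty data := by
  rw [ruleA_foldl]
  set n := data.length with hn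
  apply List.ext_getElem
  · rw [foldlA_len, init_len]
    simpa [resOf] using hn
  · intro j hj1 hj2
    rw [foldlA_len, init_len] at hj1
    have hjres : (resOf qty data)[j]'hj2 = decide (qty ≤ streakOf (data.take (j + 1))) := by
      simp [resOf]
    rw [hjres]
    have hgd : (((PySem.List.pyRange 0 ((n:Int) - (qty - 1))).foldl
        (fun r i => if fA data qty i then PySem.List.pySetD r (i + (qty - 1)) true else r)
        ((PySem.List.pyRange 0 (n : Int)).map (fun _ => false)))[j]'(by rw [foldlA_len, init_len]; exact hj1)) =
        (((PySem.List.pyRange 0 ((n:Int) - (qty - 1))).foldl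
        (fun r i => if fA data qty i then PySem.List.pySetD r (i + (qty - 1)) true else r)
        ((PySem.List.pyRange 0 (n : Int)).map (fun _ => false))).getD j false) := by
      rw [List.getD_eq_getElem?_getD, List.getElem?_eq_getElem (by rw [foldlA_len, init_len]; exact hj1)]
      rfl
    rw [hgd, foldlA, init_getD_false, init_len, Bool.false_or]
    -- now: any = decide(...)
    rw [Bool.eq_iff_iff]
    simp only [List.any_eq_true, PySem.List.mem_pyRange_one, Bool.and_eq_true, beq_iff_eq,
      decide_eq_true_eq]
    have htake_ne : data.take (j + 1) ≠ [] := by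
      intro h
      have := congrArg List.length h
      simp only [List.length_take, List.length_nil] at this
      omega
    by_cases hq : 1 ≤ qty
    · -- qty ≥ 1
      set k := qty.toNat with hkdef
      have hqk : qty = (k : Int) := by omega
      have hk1 : 1 ≤ k := by omega
      have hlen_take : (data.take (j + 1)).length = j + 1 := by
        simp only [List.length_take]; omega
      have hmain := main_iff (data.take (j + 1)) k hk1
      rw [hlen_take] at hmain
      rw [hqk, hmain]
      have hsl : ∀ hi : k ≤ j + 1, PySem.List.slice data (some ((j:Int) + 1 - (k:Int)))
          (some ((j:Int) + 1 - (k:Int) + (k:Int))) = (data.drop (j + 1 - k)).take k := by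
        intro hi
        have ha : (0:Int) ≤ (j:Int) + 1 - (k:Int) := by omega
        have hb : (0:Int) ≤ (j:Int) + 1 - (k:Int) + (k:Int) := by omega
        rw [PySem.List.slice_toNat data ha hb,
          show ((j:Int) + 1 - (k:Int) + (k:Int)).toNat - ((j:Int) + 1 - (k:Int)).toNat = k by omega,
          show ((j:Int) + 1 - (k:Int)).toNat = j + 1 - k by omega]
      by_cases hkj : k ≤ j + 1
      · have hwin : (data.take (j + 1)).drop (j + 1 - k) =
            (data.drop (j + 1 - k)).take k := by
          rw [List.drop_take]
          congr 1
          omega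
        rw [hwin]
        constructor
        · rintro ⟨i, ⟨hi0, hiu⟩, hfa, hidx⟩
          have hieq : i = (j : Int) + 1 - (k:Int) := by
            unfold PySem.List.pyIdx? at hidx
            rw [if_pos (by omega : (0:Int) ≤ i + ((k:Int) - 1))] at hidx
            by_cases hlt : i + ((k:Int) - 1) < (n : Int)
            · rw [if_pos hlt] at hidx
              have := Option.some.inj hidx
              omega
            · rw [if_neg hlt] at hidx; exact absurd hidx (by simp)
          subst hieq
          refine ⟨by omega, ?_⟩
          rw [fA, chkF_eq, hsl hkj] at hfa
          exact hfa
        · rintro ⟨hkj', hchk⟩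
          refine ⟨(j : Int) + 1 - (k:Int), ⟨by omega, by omega⟩, ?_, ?_⟩
          · rw [fA, chkF_eq, hsl hkj]
            exact hchk
          · unfold PySem.List.pyIdx?
            rw [if_pos (by omega), if_pos (by omega)]
            congr 1
            omega
      · constructor
        · rintro ⟨i, ⟨hi0, hiu⟩, hfa, hidx⟩
          exfalso
          unfold PySem.List.pyIdx? at hidx
          rw [if_pos (by omega : (0:Int) ≤ i + ((k:Int) - 1))] at hidx
          by_cases hlt : i + ((k:Int) - 1) < (n : Int)
          · rw [if_pos hlt] at hidx
            have := Option.some.inj hidx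
            omega
          · rw [if_neg hlt] at hidx; exact absurd hidx (by simp)
        · rintro ⟨hkj', _⟩; omega
    · -- qty ≤ 0 : RHS always true, witness i = j+1-qty
      push_neg at hq
      have hrhs : qty ≤ streakOf (data.take (j + 1)) := by
        have := one_le_streakOf _ htake_ne
        omega
      constructor
      · intro _; exact hrhs
      · intro _
        refine ⟨(j : Int) + 1 - qty, ⟨by omega, by omega⟩, ?_, ?_⟩
        · rw [fA]
          have hsl : PySem.List.slice data (some ((j:Int) + 1 - qty)) (some ((j:Int) + 1 - qty + qty))
              = [] := by
            have ha : (0:Int) ≤ (j:Int) + 1 - qty := by omega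
            have hb : (0:Int) ≤ (j:Int) + 1 - qty + qty := by omega
            rw [PySem.List.slice_toNat data ha hb]
            rw [show ((j:Int) + 1 - qty + qty).toNat - ((j:Int) + 1 - qty).toNat = 0 by omega]
            rfl
          rw [hsl]
          rfl
        · unfold PySem.List.pyIdx?
          rw [if_pos (by omega), if_pos (by omega)]
          congr 1
          omega

-- ===== VERDICT (by name: the statement is the Claim_ definition above) =====
theorem rule5_spec : Claim_equal_rule5 := by
  intro data qty _hdom hpre
  unfold Spec_rule5
  unfold Pre_rule5 at hpre
  rw [ruleB_eq data qty]
  exact ruleA_eq_resOf data qty hpre
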